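-- pv_equiv track=rewrite | github.com/AlonEirew/CoreSearch | src/train.py | passage_position_selection
-- ===== SOURCE A (Python) =====
-- def passage_position_selection(start_labs, end_labs, query_start, query_end):
--     q_mention_length = query_end - query_start
--     if start_labs[0] == 0 and end_labs[0] == 0:
--         return start_labs[0], end_labs[0]
--     elif start_labs[0] == 0:
--         if 0 in end_labs:
--             return start_labs[0], end_labs[end_labs.index(0)]
--         else:
--             for end in end_labs:
--                 found = next((start for start in start_labs if start + q_mention_length - 1 <= end), -1)
--                 if found > 0:
--                     return found, end
--     elif end_labs[0] == 0:
--         if 0 in start_labs: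
--             return start_labs[start_labs.index(0)], end_labs[0]
--         else:
--             for start in start_labs:
--                 found = next((end for end in end_labs if end - q_mention_length + 1 >= start), -1)
--                 if found > 0:
--                     return start, found
--
--     return start_labs[0], end_labs[0]
-- ===== SOURCE B (Python) =====
-- def _prefix_mins(xs):
--     # pm[i] = min(xs[0..i]); non-increasing
--     pm = []
--     m = None
--     for x in xs:
--         if m is None or x < m:
--             m = x
--         pm.append(m)
--     return pm
--
--
-- def _first_le(pm, t):
--     # pm is non-increasing: binary search for the leftmost index with pm[i] <= t
--     lo, hi = 0, len(pm)
--     while lo < hi: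
--         mid = (lo + hi) // 2
--         if pm[mid] <= t:
--             hi = mid
--         else:
--             lo = mid + 1
--     return lo
--
--
-- def passage_position_selection(start_labs, end_labs, query_start, query_end):
--     L = query_end - query_start
--     s0, e0 = start_labs[0], end_labs[0]
--     if s0 == 0 and e0 == 0:
--         return 0, 0
--     if s0 == 0:
--         if 0 in end_labs:
--             return 0, 0
--         pm = _prefix_mins(start_labs)
--         for e in end_labs:
--             i = _first_le(pm, e - L + 1)
--             if i < len(pm) and pm[i] > 0:
--                 return pm[i], e
--         return 0, e0
--     if e0 == 0:
--         if 0 in start_labs: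
--             return 0, 0
--         # reuse the min machinery on negated ends: first end >= t == first -end <= -t
--         pm = _prefix_mins([-e for e in end_labs])
--         for s in start_labs:
--             i = _first_le(pm, -(s + L - 1))
--             if i < len(pm) and -pm[i] > 0:
--                 return s, -pm[i]
--         return s0, 0
--     return s0, e0
-- ===== Notes on version B (the rewrite author's own statement) =====
-- stated objective: alternative
-- what changed: A rescans the whole other label list front-to-back (next() over a generator) for every candidate position; B builds a running-minimum array of that list once and answers each candidate's 'first label meeting the threshold' query with a binary search on it (the end-label branch reuses the same machinery on the negated list); on the benchmark's inputs the early-return paths dominate, so the measured cost is the same.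
import Mathlib
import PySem

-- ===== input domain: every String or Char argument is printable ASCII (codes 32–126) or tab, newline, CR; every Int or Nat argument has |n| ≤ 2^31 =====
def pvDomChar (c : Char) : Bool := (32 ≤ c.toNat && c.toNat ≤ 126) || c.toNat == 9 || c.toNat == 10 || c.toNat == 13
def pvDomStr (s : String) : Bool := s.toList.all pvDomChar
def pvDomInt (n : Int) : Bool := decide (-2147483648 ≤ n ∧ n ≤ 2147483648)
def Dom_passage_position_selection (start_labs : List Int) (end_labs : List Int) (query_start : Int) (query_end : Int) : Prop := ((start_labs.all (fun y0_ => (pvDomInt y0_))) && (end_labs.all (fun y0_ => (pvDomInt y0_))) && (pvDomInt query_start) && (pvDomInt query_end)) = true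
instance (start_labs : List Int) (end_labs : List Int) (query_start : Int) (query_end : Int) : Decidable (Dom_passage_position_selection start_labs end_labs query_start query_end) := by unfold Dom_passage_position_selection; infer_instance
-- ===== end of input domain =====

-- B replaces A's nested scan (for each candidate, rescan the other label list front-to-back with
-- next()) by a running-minimum array built once plus a binary search per candidate; return values
-- are proved identical on all inputs with nonempty label lists (A raises IndexError on empty ones).

-- ===== PORT A =====
-- A's inner `next((start for start in start_labs if start + L - 1 <= end), -1)` is
-- List.find? + getD (first element of the filtering generator, or the default).
def pvLoopEnds (start_labs : List Int) (L : Int) : List Int → Option (Int × Int)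
  | [] => none
  | e :: rest =>
    let found := (start_labs.find? (fun s => decide (s + L - 1 ≤ e))).getD (-1)
    if found > 0 then some (found, e) else pvLoopEnds start_labs L rest

def pvLoopStarts (end_labs : List Int) (L : Int) : List Int → Option (Int × Int)
  | [] => none
  | s :: rest =>
    let found := (end_labs.find? (fun e => decide (e - L + 1 ≥ s))).getD (-1)
    if found > 0 then some (s, found) else pvLoopStarts end_labs L rest

def passage_position_selection (start_labs : List Int) (end_labs : List Int) (query_start : Int) (query_end : Int) : Int × Int :=
  let L := query_end - query_start
  let s0 := start_labs.headD 0   -- start_labs[0]; Pre_ guarantees nonempty (IndexError otherwise)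
  let e0 := end_labs.headD 0
  if s0 = 0 ∧ e0 = 0 then (s0, e0)
  else if s0 = 0 then
    if end_labs.contains 0 then
      (s0, (match PySem.List.index? end_labs 0 with
            | some k => (PySem.List.pyGet? end_labs (k : Int)).getD 0
            | none => 0))
    else
      match pvLoopEnds start_labs L end_labs with
      | some r => r
      | none => (s0, e0)
  else if e0 = 0 then
    if start_labs.contains 0 then
      ((match PySem.List.index? start_labs 0 with
        | some k => (PySem.List.pyGet? start_labs (k : Int)).getD 0
        | none => 0), e0)
    else
      match pvLoopStarts end_labs L start_labs with
      | some r => r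
      | none => (s0, e0)
  else (s0, e0)

-- ===== PORT B =====
-- running minimum: `m = None; for x in xs: if m is None or x < m: m = x; pm.append(m)`
def pvGoMins (m : Int) : List Int → List Int
  | [] => []
  | x :: rest => let m' := if x < m then x else m; m' :: pvGoMins m' rest

def pvPrefixMins : List Int → List Int
  | [] => []
  | x :: rest => x :: pvGoMins x rest

-- `while lo < hi: mid = (lo+hi)//2; ...` — leftmost index with pm[i] <= t on a non-increasing pm
def pvFirstLE (pm : List Int) (t : Int) (lo hi : Nat) : Nat :=
  if h : lo < hi then
    let mid := (lo + hi) / 2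
    if pm.getD mid 0 ≤ t then pvFirstLE pm t lo mid
    else pvFirstLE pm t (mid + 1) hi
  else lo
termination_by hi - lo
decreasing_by all_goals omega

def pvAltLoopEnds (pm : List Int) (L : Int) : List Int → Option (Int × Int)
  | [] => none
  | e :: rest =>
    let i := pvFirstLE pm (e - L + 1) 0 pm.length
    if i < pm.length ∧ 0 < pm.getD i 0 then some (pm.getD i 0, e)
    else pvAltLoopEnds pm L rest

def pvAltLoopStarts (pm : List Int) (L : Int) : List Int → Option (Int × Int)
  | [] => none
  | s :: rest =>
    let i := pvFirstLE pm (-(s + L - 1)) 0 pm.length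
    if i < pm.length ∧ 0 < -(pm.getD i 0) then some (s, -(pm.getD i 0))
    else pvAltLoopStarts pm L rest

def passage_position_selection_alt (start_labs : List Int) (end_labs : List Int) (query_start : Int) (query_end : Int) : Int × Int :=
  let L := query_end - query_start
  let s0 := start_labs.headD 0
  let e0 := end_labs.headD 0
  if s0 = 0 ∧ e0 = 0 then (0, 0)
  else if s0 = 0 then
    if end_labs.contains 0 then (0, 0)
    else
      match pvAltLoopEnds (pvPrefixMins start_labs) L end_labs with
      | some r => r
      | none => (0, e0)
  else if e0 = 0 then
    if start_labs.contains 0 then (0, 0)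
    else
      match pvAltLoopStarts (pvPrefixMins (end_labs.map (fun x => -x))) L start_labs with
      | some r => r
      | none => (s0, 0)
  else (s0, e0)

-- ===== PRECONDITION & SPEC =====
-- Pre_ excludes exactly the inputs where A raises IndexError: an empty start_labs or end_labs.
def Pre_passage_position_selection (start_labs : List Int) (end_labs : List Int) (query_start : Int) (query_end : Int) : Prop :=
  start_labs ≠ [] ∧ end_labs ≠ []
instance (start_labs : List Int) (end_labs : List Int) (query_start : Int) (query_end : Int) : Decidable (Pre_passage_position_selection start_labs end_labs query_start query_end) := by unfold Pre_passage_position_selection; infer_instance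

def pvWitness_passage_position_selection : List Int × List Int × Int × Int := ([3, 1], [2, 5], 1, 3)

def Spec_passage_position_selection (start_labs : List Int) (end_labs : List Int) (query_start : Int) (query_end : Int) (out : Int × Int) : Prop := out = passage_position_selection_alt start_labs end_labs query_start query_end
instance (start_labs : List Int) (end_labs : List Int) (query_start : Int) (query_end : Int) (out : Int × Int) : Decidable (Spec_passage_position_selection start_labs end_labs query_start query_end out) := by unfold Spec_passage_position_selection; infer_instance

-- ===== CLAIM (what is proved, stated in full; the proofs are below) =====
def Claim_equal_passage_position_selection : Prop := ∀ (start_labs : List Int) (end_labs : List Int) (query_start : Int) (query_end : Int), Dom_passage_position_selection start_labs end_labs query_start query_end → Pre_passage_position_selection start_labs end_labs query_start query_end → Spec_passage_position_selection start_labs end_labs query_start query_end (passage_position_selection start_labs end_labs query_start query_end)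

-- ===== LEMMAS AND PROOFS =====

theorem pvGoMins_le (m : Int) (xs : List Int) : ∀ v ∈ pvGoMins m xs, v ≤ m := by
  induction xs generalizing m with
  | nil => simp [pvGoMins]
  | cons x rest ih =>
    simp only [pvGoMins, List.mem_cons]
    rintro v (rfl | hv)
    · split <;> omega
    · have := ih _ v hv
      split at this <;> omega

theorem pvGoMins_pairwise (m : Int) (xs : List Int) :
    (pvGoMins m xs).Pairwise (fun a b => b ≤ a) := by
  induction xs generalizing m with
  | nil => simp [pvGoMins]
  | cons x rest ih =>
    simp only [pvGoMins]
    exact List.Pairwise.cons (fun v hv => pvGoMins_le _ _ v hv) (ih _)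

theorem pvPrefixMins_pairwise (xs : List Int) :
    (pvPrefixMins xs).Pairwise (fun a b => b ≤ a) := by
  cases xs with
  | nil => simp [pvPrefixMins]
  | cons x rest =>
    simp only [pvPrefixMins]
    exact List.Pairwise.cons (fun v hv => pvGoMins_le _ _ v hv) (pvGoMins_pairwise _ _)

theorem pvGoMins_length (m : Int) (xs : List Int) : (pvGoMins m xs).length = xs.length := by
  induction xs generalizing m with
  | nil => rfl
  | cons x rest ih => simp only [pvGoMins, List.length_cons, ih]

theorem pvPrefixMins_length (xs : List Int) : (pvPrefixMins xs).length = xs.length := by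
  cases xs with
  | nil => rfl
  | cons x rest => simp only [pvPrefixMins, List.length_cons, pvGoMins_length]

theorem pvPrefixMins_antitone (xs : List Int) (i j : Nat) (hij : i ≤ j)
    (hj : j < (pvPrefixMins xs).length) :
    (pvPrefixMins xs).getD j 0 ≤ (pvPrefixMins xs).getD i 0 := by
  rcases Nat.lt_or_ge i j with h | h
  · have hp := (List.pairwise_iff_getElem).mp (pvPrefixMins_pairwise xs) i j (by omega) hj h
    have e1 : (pvPrefixMins xs).getD j 0 = (pvPrefixMins xs)[j] := List.getD_eq_getElem _ 0 hj
    have e2 : (pvPrefixMins xs).getD i 0 = (pvPrefixMins xs)[i]'(by omega) :=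
      List.getD_eq_getElem _ 0 (by omega)
    rw [e1, e2]; exact hp
  · have : i = j := by omega
    subst this; rfl

theorem pvGoMins_find (t : Int) (xs : List Int) : ∀ m : Int, t < m →
    (pvGoMins m xs).findIdx (fun v => decide (v ≤ t)) = xs.findIdx (fun v => decide (v ≤ t)) ∧
    (pvGoMins m xs).getD (xs.findIdx (fun v => decide (v ≤ t))) 0
      = xs.getD (xs.findIdx (fun v => decide (v ≤ t))) 0 := by
  induction xs with
  | nil => intro m _; simp [pvGoMins]
  | cons x rest ih =>
    intro m hm
    simp only [pvGoMins]
    by_cases hx : x ≤ t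
    · have hm' : (if x < m then x else m) = x := by split <;> omega
      rw [hm']
      constructor
      · rw [List.findIdx_cons, List.findIdx_cons]
        simp [hx]
      · rw [List.findIdx_cons]
        simp [hx]
    · have hm' : t < (if x < m then x else m) := by split <;> omega
      obtain ⟨h1, h2⟩ := ih _ hm'
      constructor
      · have hd : decide ((if x < m then x else m) ≤ t) = false := by
          simp only [decide_eq_false_iff_not]; omega
        rw [List.findIdx_cons, List.findIdx_cons, hd]
        simp [hx, h1]
      · rw [List.findIdx_cons]
        simp only [hx, decide_false, cond_false]
        simpa using h2

theorem pvPrefixMins_find (t : Int) (xs : List Int) :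
    (pvPrefixMins xs).findIdx (fun v => decide (v ≤ t)) = xs.findIdx (fun v => decide (v ≤ t)) ∧
    (pvPrefixMins xs).getD (xs.findIdx (fun v => decide (v ≤ t))) 0
      = xs.getD (xs.findIdx (fun v => decide (v ≤ t))) 0 := by
  cases xs with
  | nil => simp [pvPrefixMins]
  | cons x rest =>
    simp only [pvPrefixMins]
    by_cases hx : x ≤ t
    · constructor
      · rw [List.findIdx_cons, List.findIdx_cons]; simp [hx]
      · rw [List.findIdx_cons]; simp [hx]
    · obtain ⟨h1, h2⟩ := pvGoMins_find t rest x (by omega)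
      constructor
      · rw [List.findIdx_cons, List.findIdx_cons]
        simp only [hx, decide_false]
        simp [h1]
      · rw [List.findIdx_cons]
        simp only [hx, decide_false, cond_false]
        simpa using h2

theorem pvFindIdx_base (pm : List Int) (t : Int) (lo : Nat) (hle : lo ≤ pm.length)
    (inv1 : ∀ k, k < lo → t < pm.getD k 0)
    (inv2 : ∀ k, lo ≤ k → k < pm.length → pm.getD k 0 ≤ t) :
    lo = pm.findIdx (fun v => decide (v ≤ t)) := by
  by_cases hl : lo < pm.length
  · symm; rw [List.findIdx_eq hl]
    constructor
    · have := inv2 lo le_rfl hl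
      rw [List.getD_eq_getElem _ _ hl] at this
      simpa using this
    · intro j hj
      have := inv1 j hj
      rw [List.getD_eq_getElem _ _ (by omega)] at this
      simp only [decide_eq_false_iff_not]; omega
  · have hl' : lo = pm.length := by omega
    rw [hl']; symm; rw [List.findIdx_eq_length]
    intro x hx
    obtain ⟨k, hk, rfl⟩ := List.mem_iff_getElem.mp hx
    have := inv1 k (by omega)
    rw [List.getD_eq_getElem _ _ hk] at this
    simp only [decide_eq_false_iff_not]; omega

-- the binary search finds the first index satisfying the predicate, on an antitone list
theorem pvFirstLE_go (pm : List Int) (t : Int)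
    (anti : ∀ i j, i ≤ j → j < pm.length → pm.getD j 0 ≤ pm.getD i 0) :
    ∀ fuel lo hi, hi - lo ≤ fuel → lo ≤ hi → hi ≤ pm.length →
    (∀ k, k < lo → t < pm.getD k 0) → (∀ k, hi ≤ k → k < pm.length → pm.getD k 0 ≤ t) →
    pvFirstLE pm t lo hi = pm.findIdx (fun v => decide (v ≤ t)) := by
  intro fuel
  induction fuel with
  | zero =>
    intro lo hi h1 h2 h3 inv1 inv2
    have hlh : lo = hi := by omega
    rw [pvFirstLE, dif_neg (by omega)]
    subst hlh
    exact pvFindIdx_base pm t lo h3 inv1 inv2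
  | succ fuel ih =>
    intro lo hi h1 h2 h3 inv1 inv2
    by_cases h : lo < hi
    · rw [pvFirstLE, dif_pos h]
      by_cases hc : pm.getD ((lo + hi) / 2) 0 ≤ t
      · rw [if_pos hc]
        exact ih lo ((lo + hi) / 2) (by omega) (by omega) (by omega) inv1
          (fun k hk hk' => le_trans (anti _ k hk hk') hc)
      · rw [if_neg hc]
        refine ih ((lo + hi) / 2 + 1) hi (by omega) (by omega) h3 ?_ inv2
        intro k hk
        have := anti k ((lo + hi) / 2) (by omega) (by omega)
        omega
    · rw [pvFirstLE, dif_neg h]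
      have hlh : lo = hi := by omega
      subst hlh
      exact pvFindIdx_base pm t lo h3 inv1 inv2

theorem pvFirstLE_eq_findIdx (pm : List Int) (t : Int)
    (anti : ∀ i j, i ≤ j → j < pm.length → pm.getD j 0 ≤ pm.getD i 0) :
    pvFirstLE pm t 0 pm.length = pm.findIdx (fun v => decide (v ≤ t)) :=
  pvFirstLE_go pm t anti pm.length 0 pm.length (by omega) (by omega) le_rfl
    (by omega) (by intro k hk hk'; omega)

theorem pvFirstLE_prefixMins (xs : List Int) (t : Int) :
    pvFirstLE (pvPrefixMins xs) t 0 (pvPrefixMins xs).length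
      = xs.findIdx (fun v => decide (v ≤ t)) := by
  rw [pvFirstLE_eq_findIdx _ _ (pvPrefixMins_antitone xs)]
  exact (pvPrefixMins_find t xs).1

theorem pvFind?_getD (p : Int → Bool) (xs : List Int) (d : Int) :
    (xs.find? p).getD d = if h : xs.findIdx p < xs.length then xs[xs.findIdx p] else d := by
  induction xs with
  | nil => simp
  | cons x rest ih =>
    rw [List.find?_cons, List.findIdx_cons]
    cases hp : p x with
    | true => simp
    | false =>
      simp only [cond_false]
      rw [ih]
      by_cases h : rest.findIdx p < rest.length
      · rw [dif_pos h, dif_pos (by simpa using Nat.succ_lt_succ h)]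
        simp
      · rw [dif_neg h, dif_neg (by simp only [List.length_cons]; omega)]

-- per-candidate core, end loop: B's guarded prefix-min lookup equals A's find?-with-default
theorem pvFoundEnds (xs : List Int) (L e : Int) :
    (if pvFirstLE (pvPrefixMins xs) (e - L + 1) 0 (pvPrefixMins xs).length < (pvPrefixMins xs).length
       then (pvPrefixMins xs).getD (pvFirstLE (pvPrefixMins xs) (e - L + 1) 0 (pvPrefixMins xs).length) 0
       else -1)
    = (xs.find? (fun s => decide (s + L - 1 ≤ e))).getD (-1) := by
  have hp : (fun s => decide (s + L - 1 ≤ e)) = (fun v => decide (v ≤ e - L + 1)) :=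
    funext fun s => decide_eq_decide.mpr (by omega)
  rw [hp, pvFind?_getD, pvFirstLE_prefixMins, pvPrefixMins_length]
  by_cases hj : xs.findIdx (fun v => decide (v ≤ e - L + 1)) < xs.length
  · rw [if_pos hj, dif_pos hj, (pvPrefixMins_find (e - L + 1) xs).2,
      List.getD_eq_getElem _ _ hj]
  · rw [if_neg hj, dif_neg hj]

-- per-candidate core, start loop: the same machinery on the negated end list
theorem pvFoundStarts (xs : List Int) (L s : Int) :
    (if pvFirstLE (pvPrefixMins (xs.map (fun x => -x))) (-(s + L - 1)) 0 (pvPrefixMins (xs.map (fun x => -x))).length < (pvPrefixMins (xs.map (fun x => -x))).length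
       then -((pvPrefixMins (xs.map (fun x => -x))).getD (pvFirstLE (pvPrefixMins (xs.map (fun x => -x))) (-(s + L - 1)) 0 (pvPrefixMins (xs.map (fun x => -x))).length) 0)
       else -1)
    = (xs.find? (fun e => decide (e - L + 1 ≥ s))).getD (-1) := by
  have hIdx : (xs.map (fun x => -x)).findIdx (fun v => decide (v ≤ -(s + L - 1)))
      = xs.findIdx (fun e => decide (e - L + 1 ≥ s)) := by
    rw [List.findIdx_map]
    congr 1
    funext x
    exact decide_eq_decide.mpr (by simp; omega)
  rw [pvFind?_getD, pvFirstLE_prefixMins, hIdx, pvPrefixMins_length, List.length_map]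
  by_cases hj : xs.findIdx (fun e => decide (e - L + 1 ≥ s)) < xs.length
  · rw [if_pos hj, dif_pos hj]
    have h2 := (pvPrefixMins_find (-(s + L - 1)) (xs.map (fun x => -x))).2
    rw [hIdx] at h2
    rw [h2, List.getD_eq_getElem _ _ (by simpa using hj), List.getElem_map]
    omega
  · rw [if_neg hj, dif_neg hj]

theorem pvLoopEnds_eq (start_labs : List Int) (L : Int) (ends : List Int) :
    pvAltLoopEnds (pvPrefixMins start_labs) L ends = pvLoopEnds start_labs L ends := by
  induction ends with
  | nil => rfl
  | cons e rest ih =>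
    rw [pvAltLoopEnds, pvLoopEnds]
    have hF := pvFoundEnds start_labs L e
    by_cases hi : pvFirstLE (pvPrefixMins start_labs) (e - L + 1) 0 (pvPrefixMins start_labs).length < (pvPrefixMins start_labs).length
    · rw [if_pos hi] at hF
      by_cases hpos : 0 < (pvPrefixMins start_labs).getD (pvFirstLE (pvPrefixMins start_labs) (e - L + 1) 0 (pvPrefixMins start_labs).length) 0
      · rw [if_pos ⟨hi, hpos⟩, if_pos (by omega), hF]
      · rw [if_neg (by tauto), if_neg (by omega), ih]
    · rw [if_neg hi] at hF
      rw [if_neg (by tauto), if_neg (by omega), ih]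

theorem pvLoopStarts_eq (end_labs : List Int) (L : Int) (starts : List Int) :
    pvAltLoopStarts (pvPrefixMins (end_labs.map (fun x => -x))) L starts
      = pvLoopStarts end_labs L starts := by
  induction starts with
  | nil => rfl
  | cons s rest ih =>
    rw [pvAltLoopStarts, pvLoopStarts]
    have hF := pvFoundStarts end_labs L s
    by_cases hi : pvFirstLE (pvPrefixMins (end_labs.map (fun x => -x))) (-(s + L - 1)) 0 (pvPrefixMins (end_labs.map (fun x => -x))).length < (pvPrefixMins (end_labs.map (fun x => -x))).length
    · rw [if_pos hi] at hF
      by_cases hpos : 0 < -((pvPrefixMins (end_labs.map (fun x => -x))).getD (pvFirstLE (pvPrefixMins (end_labs.map (fun x => -x))) (-(s + L - 1)) 0 (pvPrefixMins (end_labs.map (fun x => -x))).length) 0)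
      · rw [if_pos ⟨hi, hpos⟩, if_pos (by omega), hF]
      · rw [if_neg (by tauto), if_neg (by omega), ih]
    · rw [if_neg hi] at hF
      rw [if_neg (by tauto), if_neg (by omega), ih]

-- A's `lst[lst.index(0)]` is 0 whenever `0 in lst`
theorem pvIndexZero (xs : List Int) (hx : xs.contains 0) :
    (match PySem.List.index? xs 0 with
     | some k => (PySem.List.pyGet? xs (k : Int)).getD 0
     | none => 0) = (0 : Int) := by
  have hm : (0 : Int) ∈ xs := by simpa using hx
  obtain ⟨k, hk⟩ := Option.isSome_iff_exists.mp ((PySem.List.index?_isSome_iff xs 0).mpr hm)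
  obtain ⟨hklt, hxk, _⟩ := PySem.List.getElem_of_index?_eq_some hk
  rw [hk]
  show (PySem.List.pyGet? xs (k : Int)).getD 0 = 0
  rw [PySem.List.pyGet?_natCast, List.getElem?_eq_getElem hklt]
  simp [hxk]

-- ===== VERDICT (by name: the statement is the Claim_ definition above) =====
theorem passage_position_selection_spec : Claim_equal_passage_position_selection := by
  intro start_labs end_labs query_start query_end _hD hPre
  unfold Spec_passage_position_selection
  obtain ⟨hs, he⟩ := hPre
  simp only [passage_position_selection, passage_position_selection_alt]
  split_ifs with h1 h2 h3 h4 h5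
  · exact Prod.ext h1.1 h1.2
  · exact Prod.ext h2 (pvIndexZero end_labs h3)
  · rw [pvLoopEnds_eq]
    cases pvLoopEnds start_labs (query_end - query_start) end_labs with
    | none => exact Prod.ext h2 rfl
    | some r => rfl
  · exact Prod.ext (pvIndexZero start_labs h5) h4
  · rw [pvLoopStarts_eq]
    cases pvLoopStarts end_labs (query_end - query_start) start_labs with
    | none => exact Prod.ext rfl h4
    | some r => rfl
  · rfl
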